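-- pv_equiv track=rewrite | github.com/dsrizvi/algo-interview-prep | hacker-rank/strings/mars-exploration.py | count_changed
-- ===== SOURCE A (Python) =====
-- def count_changed(S):
--     S_list = list(S)
--     SOS = ['S', 'O', 'S']
--     i = 0
--     error_count = 0
--
--     for c in S_list:
--         if c != SOS[i]:
--             error_count += 1
--         i = (i+1)%3
--
--     return error_count
-- ===== SOURCE B (Python) =====
-- def count_changed(S):
--     total = 0
--     for i in range(0, len(S), 3):
--         chunk = S[i:i+3]
--         total += sum(1 for a, b in zip(chunk, "SOS") if a != b)
--     return total
-- ===== Notes on version B (the rewrite author's own statement) =====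
-- stated objective: alternative
-- what changed: Replaces A's flat loop with a running modulo-3 index by a two-level traversal that slices the string into 3-character chunks and sums each chunk's positional mismatches against the pattern via zip.
import Mathlib
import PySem

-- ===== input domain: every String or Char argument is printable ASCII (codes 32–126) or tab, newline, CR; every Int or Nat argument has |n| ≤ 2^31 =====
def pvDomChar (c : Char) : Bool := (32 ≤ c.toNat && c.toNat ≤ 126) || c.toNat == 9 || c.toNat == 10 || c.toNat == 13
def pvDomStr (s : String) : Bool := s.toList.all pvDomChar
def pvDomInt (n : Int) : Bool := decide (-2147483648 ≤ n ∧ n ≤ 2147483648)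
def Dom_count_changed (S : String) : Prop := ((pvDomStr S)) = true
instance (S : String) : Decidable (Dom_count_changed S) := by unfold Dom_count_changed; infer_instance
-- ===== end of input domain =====

-- B replaces A's flat loop with a modulo-3 index by a chunk-of-3 traversal; same O(n) cost (objective: alternative).

-- ===== PORT A =====
-- the SOS pattern list of A
def pvSOS : List Char := ['S', 'O', 'S']

-- flat loop body: state (i, error_count); SOS[i] is always in range so getD's default is never used
def pvStep (st : Int × Int) (c : Char) : Int × Int :=
  let e := if c ≠ (PySem.List.pyGet? pvSOS st.1).getD ' ' then st.2 + 1 else st.2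
  (PySem.Int.mod (st.1 + 1) 3, e)

def count_changed (S : String) : Int :=
  (S.toList.foldl pvStep ((0 : Int), (0 : Int))).2

-- ===== PORT B =====
-- mismatches of zip(chunk, "SOS")
def pvMism : List Char → List Char → Int
  | a :: as, b :: bs => (if a ≠ b then 1 else 0) + pvMism as bs
  | _, _ => 0

-- iterate over chunks of 3 (drop 3 (a :: rest) = drop 2 rest)
def pvChunks (l : List Char) : Int :=
  match l with
  | [] => 0
  | a :: rest => pvMism (List.take 3 (a :: rest)) ['S', 'O', 'S'] + pvChunks (List.drop 2 rest)
termination_by l.length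
decreasing_by simp [List.length_drop]

def count_changed_alt (S : String) : Int := pvChunks S.toList

-- ===== PRECONDITION & SPEC =====
def Spec_count_changed (S : String) (out : Int) : Prop := out = count_changed_alt S
instance (S : String) (out : Int) : Decidable (Spec_count_changed S out) := by unfold Spec_count_changed; infer_instance

-- ===== CLAIM (what is proved, stated in full; the proofs are below) =====
def Claim_equal_count_changed : Prop := ∀ (S : String), Dom_count_changed S → Spec_count_changed S (count_changed S)

-- ===== LEMMAS AND PROOFS =====

-- evaluating one step of A's loop at a literal index
theorem pv_step_eval (i e : Int) (a x : Char) (j : Int)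
    (hx : (PySem.List.pyGet? pvSOS i).getD ' ' = x) (hj : PySem.Int.mod (i + 1) 3 = j) :
    pvStep (i, e) a = (j, if a ≠ x then e + 1 else e) := by
  subst hx hj; rfl

-- invariant: the fold started at index 0 with accumulator e yields e + chunk count
theorem pv_fold_eq_chunks (n : Nat) : ∀ (l : List Char), l.length ≤ n → ∀ (e : Int),
    (l.foldl pvStep ((0 : Int), e)).2 = e + pvChunks l := by
  induction n with
  | zero =>
    intro l hl e
    match l, hl with
    | [], _ => simp [pvChunks]
  | succ n ih =>
    intro l hl e
    match l with
    | [] => simp [pvChunks]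
    | [a] =>
      simp only [List.foldl_cons, List.foldl_nil,
        pv_step_eval 0 e a 'S' 1 (by decide) (by decide)]
      simp [pvChunks, pvMism]
      split <;> ring
    | [a, b] =>
      simp only [List.foldl_cons, List.foldl_nil,
        pv_step_eval 0 e a 'S' 1 (by decide) (by decide),
        pv_step_eval 1 _ b 'O' 2 (by decide) (by decide)]
      simp [pvChunks, pvMism]
      split <;> split <;> ring
    | a :: b :: c :: t =>
      simp only [List.foldl_cons,
        pv_step_eval 0 e a 'S' 1 (by decide) (by decide),
        pv_step_eval 1 _ b 'O' 2 (by decide) (by decide),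
        pv_step_eval 2 _ c 'S' 0 (by decide) (by decide)]
      have ht : t.length ≤ n := by simp at hl; omega
      rw [ih t ht]
      simp only [pvChunks, pvMism, List.take, List.drop]
      split <;> split <;> split <;> ring

-- ===== VERDICT (by name: the statement is the Claim_ definition above) =====
theorem count_changed_spec : Claim_equal_count_changed := by
  intro S _
  unfold Spec_count_changed count_changed count_changed_alt
  simpa using pv_fold_eq_chunks S.toList.length S.toList le_rfl 0
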